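-- pv_equiv track=rewrite | github.com/LarryLi93/AI-Chat | backend/fastapi_server.py | organize_detail_by_categories
-- ===== SOURCE A (Python) =====
-- from typing import Dict, Any, Optional, List, Tuple, Union
--
-- DETAIL_CATEGORIES = {
--     "basic": [
--         "code", "name", "ename", "series", "release_date", "makedate_year",
--         "makedate_month", "devproid", "image_urls", "report_urls", "code_start"
--     ],
--     "specs": [
--         "elem", "inelem", "yarncount", "dnumber", "weight", "width",
--         "ldensity", "hdensity", "propinnum", "fiber_type", "yarn_type",
--         "spinntype", "glosscommid", "fabric_structure_two", "fabric_erp", "fabric_structure",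
--         "className", "has_rib"
--     ],
--     "quality": [
--         "twist", "swzoomin", "shzoomin", "sph", "unpilling", "whitefiber",
--         "wetrubfast", "dry_rubbing_fastness", "spring_color_fastness",
--         "light_fastness", "quality_level", "customizable_grade", "fun_level",
--         "colorfastnotes"
--     ],
--     "process": [
--         "production_process", "devtype", "dyemethod", "dyeing_process",
--         "category", "foreignname"
--     ],
--     "price": [
--         "price", "unitid", "fewprice", "fewunitid", "fewunitrate", "mprice",
--         "yprice", "kgprice", "taxmprice", "taxyprice", "taxkgprice",
--         "unitqty", "emptyqty", "papertubeqty", "unitrate"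
--     ],
--     "operation": [
--         "type_notes", "stock_qty", "sale_num_year", "season_new", "fabe",
--         "notice", "ennotice", "introduce", "eintroduce", "slogan"
--     ]
-- }
--
-- def organize_detail_by_categories(data: Dict[str, Any]) -> Dict[str, Any]:
--     """将产品详情数据按类别整理，直接使用英文键名"""
--     result = {}
--
--     for category_name, field_keys in DETAIL_CATEGORIES.items():
--         category_data = {}
--         for key in field_keys:
--             if key in data:
--                 # 直接使用英文键名
--                 category_data[key] = data[key]
--         result[category_name] = category_data
--
--     return result
-- ===== SOURCE B (Python) =====
-- from typing import Dict, Any, Optional, List, Tuple, Union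
--
-- # Category names, in the order the result presents them.
-- _CATS = ["basic", "specs", "quality", "process", "price", "operation"]
--
-- # Precomputed inverted index of DETAIL_CATEGORIES:
-- # field key -> (category name, position of the key within that category).
-- _KEY_INDEX = {
--     "code": ("basic", 0),
--     "name": ("basic", 1),
--     "ename": ("basic", 2),
--     "series": ("basic", 3),
--     "release_date": ("basic", 4),
--     "makedate_year": ("basic", 5),
--     "makedate_month": ("basic", 6),
--     "devproid": ("basic", 7),
--     "image_urls": ("basic", 8),
--     "report_urls": ("basic", 9),
--     "code_start": ("basic", 10),
--     "elem": ("specs", 0),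
--     "inelem": ("specs", 1),
--     "yarncount": ("specs", 2),
--     "dnumber": ("specs", 3),
--     "weight": ("specs", 4),
--     "width": ("specs", 5),
--     "ldensity": ("specs", 6),
--     "hdensity": ("specs", 7),
--     "propinnum": ("specs", 8),
--     "fiber_type": ("specs", 9),
--     "yarn_type": ("specs", 10),
--     "spinntype": ("specs", 11),
--     "glosscommid": ("specs", 12),
--     "fabric_structure_two": ("specs", 13),
--     "fabric_erp": ("specs", 14),
--     "fabric_structure": ("specs", 15),
--     "className": ("specs", 16),
--     "has_rib": ("specs", 17),
--     "twist": ("quality", 0),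
--     "swzoomin": ("quality", 1),
--     "shzoomin": ("quality", 2),
--     "sph": ("quality", 3),
--     "unpilling": ("quality", 4),
--     "whitefiber": ("quality", 5),
--     "wetrubfast": ("quality", 6),
--     "dry_rubbing_fastness": ("quality", 7),
--     "spring_color_fastness": ("quality", 8),
--     "light_fastness": ("quality", 9),
--     "quality_level": ("quality", 10),
--     "customizable_grade": ("quality", 11),
--     "fun_level": ("quality", 12),
--     "colorfastnotes": ("quality", 13),
--     "production_process": ("process", 0),
--     "devtype": ("process", 1),
--     "dyemethod": ("process", 2),
--     "dyeing_process": ("process", 3),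
--     "category": ("process", 4),
--     "foreignname": ("process", 5),
--     "price": ("price", 0),
--     "unitid": ("price", 1),
--     "fewprice": ("price", 2),
--     "fewunitid": ("price", 3),
--     "fewunitrate": ("price", 4),
--     "mprice": ("price", 5),
--     "yprice": ("price", 6),
--     "kgprice": ("price", 7),
--     "taxmprice": ("price", 8),
--     "taxyprice": ("price", 9),
--     "taxkgprice": ("price", 10),
--     "unitqty": ("price", 11),
--     "emptyqty": ("price", 12),
--     "papertubeqty": ("price", 13),
--     "unitrate": ("price", 14),
--     "type_notes": ("operation", 0),
--     "stock_qty": ("operation", 1),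
--     "sale_num_year": ("operation", 2),
--     "season_new": ("operation", 3),
--     "fabe": ("operation", 4),
--     "notice": ("operation", 5),
--     "ennotice": ("operation", 6),
--     "introduce": ("operation", 7),
--     "eintroduce": ("operation", 8),
--     "slogan": ("operation", 9),
-- }
--
-- def organize_detail_by_categories(data: Dict[str, Any]) -> Dict[str, Any]:
--     """Single pass over the data: route each field through the inverted index
--     into its category bucket, then lay each bucket out in field order."""
--     buckets = {c: [] for c in _CATS}
--     for k, v in data.items():
--         loc = _KEY_INDEX.get(k)
--         if loc is not None:
--             buckets[loc[0]].append((loc[1], k, v))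
--     return {c: {k: v for _, k, v in sorted(buckets[c], key=lambda t: t[0])}
--             for c in _CATS}
-- ===== Notes on version B (the rewrite author's own statement) =====
-- stated objective: alternative
-- what changed: Instead of scanning every category's field list and probing the data dict (A), B uses a precomputed inverted index field-key -> (category, position) and makes a single pass over data.items(), routing each entry into its category bucket, then lays each bucket out by the stored position.
import Mathlib
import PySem

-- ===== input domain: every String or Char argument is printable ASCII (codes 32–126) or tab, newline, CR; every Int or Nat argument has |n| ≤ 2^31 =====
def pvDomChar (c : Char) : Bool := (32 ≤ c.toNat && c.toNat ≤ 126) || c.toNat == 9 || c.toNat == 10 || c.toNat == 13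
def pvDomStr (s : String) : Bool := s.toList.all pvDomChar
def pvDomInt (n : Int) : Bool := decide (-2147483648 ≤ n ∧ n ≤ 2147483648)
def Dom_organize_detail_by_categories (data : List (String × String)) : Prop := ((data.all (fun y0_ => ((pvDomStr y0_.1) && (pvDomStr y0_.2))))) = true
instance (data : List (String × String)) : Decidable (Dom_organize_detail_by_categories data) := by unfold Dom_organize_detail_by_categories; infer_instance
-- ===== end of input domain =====

-- B replaces A's per-category scans over the field lists by a precomputed inverted
-- index (field key -> (category, position)) and a single pass over the data;
-- objective: alternative single-pass algorithm (not claimed faster).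

-- ===== PORT A =====
-- the module constant DETAIL_CATEGORIES (dict of lists, in insertion order)
def DETAIL_CATEGORIES_L : List (String × List String) := [
  ("basic", ["code", "name", "ename", "series", "release_date", "makedate_year",
    "makedate_month", "devproid", "image_urls", "report_urls", "code_start"]),
  ("specs", ["elem", "inelem", "yarncount", "dnumber", "weight", "width",
    "ldensity", "hdensity", "propinnum", "fiber_type", "yarn_type",
    "spinntype", "glosscommid", "fabric_structure_two", "fabric_erp", "fabric_structure",
    "className", "has_rib"]),
  ("quality", ["twist", "swzoomin", "shzoomin", "sph", "unpilling", "whitefiber",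
    "wetrubfast", "dry_rubbing_fastness", "spring_color_fastness",
    "light_fastness", "quality_level", "customizable_grade", "fun_level",
    "colorfastnotes"]),
  ("process", ["production_process", "devtype", "dyemethod", "dyeing_process",
    "category", "foreignname"]),
  ("price", ["price", "unitid", "fewprice", "fewunitid", "fewunitrate", "mprice",
    "yprice", "kgprice", "taxmprice", "taxyprice", "taxkgprice",
    "unitqty", "emptyqty", "papertubeqty", "unitrate"]),
  ("operation", ["type_notes", "stock_qty", "sale_num_year", "season_new", "fabe",
    "notice", "ennotice", "introduce", "eintroduce", "slogan"])]

-- inner loop: category_data = {}; for key in field_keys: if key in data: category_data[key] = data[key]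
-- ('key in data' / 'data[key]' = first-match lookup on the association list)
def pvCatData (data : List (String × String)) (field_keys : List String) : PySem.Dict String String :=
  field_keys.foldl (fun d key =>
    match data.lookup key with
    | some v => d.insert key v
    | none => d) PySem.Dict.empty

def organize_detail_by_categories (data : List (String × String)) : List (String × List (String × String)) :=
  (DETAIL_CATEGORIES_L.foldl
    (fun result p => result.insert p.1 (pvCatData data p.2).items)
    PySem.Dict.empty).items

-- ===== PORT B =====
-- Source B's module constant _CATS
def pvCats : List String := ["basic", "specs", "quality", "process", "price", "operation"]

-- Source B's precomputed module constant _KEY_INDEX, as the association list behind it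
def pvIdxList : List (String × (String × Int)) := [
  ("code", ("basic", 0)),
  ("name", ("basic", 1)),
  ("ename", ("basic", 2)),
  ("series", ("basic", 3)),
  ("release_date", ("basic", 4)),
  ("makedate_year", ("basic", 5)),
  ("makedate_month", ("basic", 6)),
  ("devproid", ("basic", 7)),
  ("image_urls", ("basic", 8)),
  ("report_urls", ("basic", 9)),
  ("code_start", ("basic", 10)),
  ("elem", ("specs", 0)),
  ("inelem", ("specs", 1)),
  ("yarncount", ("specs", 2)),
  ("dnumber", ("specs", 3)),
  ("weight", ("specs", 4)),
  ("width", ("specs", 5)),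
  ("ldensity", ("specs", 6)),
  ("hdensity", ("specs", 7)),
  ("propinnum", ("specs", 8)),
  ("fiber_type", ("specs", 9)),
  ("yarn_type", ("specs", 10)),
  ("spinntype", ("specs", 11)),
  ("glosscommid", ("specs", 12)),
  ("fabric_structure_two", ("specs", 13)),
  ("fabric_erp", ("specs", 14)),
  ("fabric_structure", ("specs", 15)),
  ("className", ("specs", 16)),
  ("has_rib", ("specs", 17)),
  ("twist", ("quality", 0)),
  ("swzoomin", ("quality", 1)),
  ("shzoomin", ("quality", 2)),
  ("sph", ("quality", 3)),
  ("unpilling", ("quality", 4)),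
  ("whitefiber", ("quality", 5)),
  ("wetrubfast", ("quality", 6)),
  ("dry_rubbing_fastness", ("quality", 7)),
  ("spring_color_fastness", ("quality", 8)),
  ("light_fastness", ("quality", 9)),
  ("quality_level", ("quality", 10)),
  ("customizable_grade", ("quality", 11)),
  ("fun_level", ("quality", 12)),
  ("colorfastnotes", ("quality", 13)),
  ("production_process", ("process", 0)),
  ("devtype", ("process", 1)),
  ("dyemethod", ("process", 2)),
  ("dyeing_process", ("process", 3)),
  ("category", ("process", 4)),
  ("foreignname", ("process", 5)),
  ("price", ("price", 0)),
  ("unitid", ("price", 1)),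
  ("fewprice", ("price", 2)),
  ("fewunitid", ("price", 3)),
  ("fewunitrate", ("price", 4)),
  ("mprice", ("price", 5)),
  ("yprice", ("price", 6)),
  ("kgprice", ("price", 7)),
  ("taxmprice", ("price", 8)),
  ("taxyprice", ("price", 9)),
  ("taxkgprice", ("price", 10)),
  ("unitqty", ("price", 11)),
  ("emptyqty", ("price", 12)),
  ("papertubeqty", ("price", 13)),
  ("unitrate", ("price", 14)),
  ("type_notes", ("operation", 0)),
  ("stock_qty", ("operation", 1)),
  ("sale_num_year", ("operation", 2)),
  ("season_new", ("operation", 3)),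
  ("fabe", ("operation", 4)),
  ("notice", ("operation", 5)),
  ("ennotice", ("operation", 6)),
  ("introduce", ("operation", 7)),
  ("eintroduce", ("operation", 8)),
  ("slogan", ("operation", 9))]
-- _KEY_INDEX as a dict
def pvKeyIndex : PySem.Dict String (String × Int) := PySem.Dict.ofList pvIdxList

def organize_detail_by_categories_alt (data : List (String × String)) : List (String × List (String × String)) :=
  -- buckets = {c: [] for c in _CATS}
  let buckets0 : PySem.Dict String (List (Int × String × String)) :=
    PySem.Dict.ofList (pvCats.map (fun c => (c, ([] : List (Int × String × String)))))
  -- for k, v in data.items(): loc = _KEY_INDEX.get(k); if loc is not None: buckets[loc[0]].append((loc[1], k, v))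
  let buckets := data.foldl (fun b kv =>
    match pvKeyIndex.get? kv.1 with
    | some loc => b.modify loc.1 [] (fun l => l ++ [(loc.2, kv.1, kv.2)])
    | none => b) buckets0
  -- return {c: {k: v for _, k, v in sorted(buckets[c], key=lambda t: t[0])} for c in _CATS}
  (PySem.Dict.ofList (pvCats.map (fun c =>
    (c, (PySem.Dict.ofList ((PySem.List.sorted (buckets.getD c []) (fun t => t.1)).map
      (fun t => (t.2.1, t.2.2)))).items)))).items

-- ===== PRECONDITION & SPEC =====
-- Pre_ excludes association lists with duplicate keys, which cannot arise from A's Python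
-- dict argument: there A's first-match lookup and B's last-wins overwrite are both accidental.
def Pre_organize_detail_by_categories (data : List (String × String)) : Prop :=
  (data.map Prod.fst).Nodup
instance (data : List (String × String)) : Decidable (Pre_organize_detail_by_categories data) := by
  unfold Pre_organize_detail_by_categories; infer_instance

def pvWitness_organize_detail_by_categories : (List (String × String)) :=
  [("code", "7"), ("price", "9"), ("misc", "0")]

def Spec_organize_detail_by_categories (data : List (String × String)) (out : List (String × List (String × String))) : Prop := out = organize_detail_by_categories_alt data
instance (data : List (String × String)) (out : List (String × List (String × String))) : Decidable (Spec_organize_detail_by_categories data out) := by unfold Spec_organize_detail_by_categories; infer_instance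

-- ===== CLAIM (what is proved, stated in full; the proofs are below) =====
def Claim_equal_organize_detail_by_categories : Prop := ∀ (data : List (String × String)), Dom_organize_detail_by_categories data → Pre_organize_detail_by_categories data → Spec_organize_detail_by_categories data (organize_detail_by_categories data)

-- ===== LEMMAS AND PROOFS =====

-- pvIdxList and pvCats are exactly the inverted index / name list of DETAIL_CATEGORIES_L
lemma pvIdx_eq : pvIdxList = DETAIL_CATEGORIES_L.flatMap
    (fun p => (PySem.List.enumerate p.2).map (fun q => (q.2, (p.1, q.1)))) := by decide

lemma pvCats_eq : pvCats = DETAIL_CATEGORIES_L.map Prod.fst := by decide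

-- the canonical per-category list: category fields that occur in data, in field order
def pvAList (data : List (String × String)) (F : List String) : List (String × String) :=
  F.filterMap (fun k => (data.lookup k).map (fun v => (k, v)))

lemma items_ofList_nodup {ν : Type} (l : List (String × ν)) (h : (l.map Prod.fst).Nodup) :
    (PySem.Dict.ofList l).items = l := by
  have : PySem.Dict.ofList l = l.foldl (fun d a => d.insert a.1 a.2) PySem.Dict.empty := rfl
  rw [this]
  have := PySem.Dict.items_foldl_insert_fresh l Prod.fst Prod.snd PySem.Dict.empty
    (fun a _ => PySem.Dict.contains_empty _) h
  simpa using this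

lemma lookup_eq_some_iff_mem {ν : Type} (l : List (String × ν)) (k : String) (v : ν)
    (h : (l.map Prod.fst).Nodup) : l.lookup k = some v ↔ (k, v) ∈ l := by
  induction l with
  | nil => simp
  | cons a t ih =>
    obtain ⟨ka, va⟩ := a
    simp only [List.map_cons, List.nodup_cons] at h
    by_cases hk : ka = k
    · subst hk
      rw [show List.lookup ka ((ka, va) :: t) = some va by simp [List.lookup]]
      simp only [List.mem_cons, Prod.mk.injEq, true_and]
      constructor
      · rintro h'; injection h' with h'; exact Or.inl h'.symm
      · rintro (hv | h')
        · rw [hv]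
        · exact absurd (List.mem_map_of_mem (f := Prod.fst) h') (by simpa using h.1)
    · have hbk : (k == ka) = false := by simpa using Ne.symm hk
      rw [show List.lookup k ((ka, va) :: t) = List.lookup k t by simp [List.lookup, hbk]]
      rw [ih h.2]
      simp only [List.mem_cons, Prod.mk.injEq]
      constructor
      · exact fun h' => Or.inr h'
      · rintro (⟨hk', _⟩ | h')
        · exact absurd hk'.symm hk
        · exact h'

-- A's inner dict loop produces pvAList
lemma catData_items (data : List (String × String)) (F : List String) (hF : F.Nodup)
    (d : PySem.Dict String String) (hdis : ∀ x ∈ F, d.contains x = false) (hnd : d.keys.Nodup) :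
    (F.foldl (fun d key =>
      match data.lookup key with
      | some v => d.insert key v
      | none => d) d).items = d.items ++ pvAList data F := by
  induction F generalizing d with
  | nil => simp [pvAList]
  | cons k t ih =>
    simp only [List.nodup_cons] at hF
    simp only [List.foldl_cons]
    cases h : data.lookup k with
    | none =>
      rw [ih hF.2 d (fun x hx => hdis x (List.mem_cons_of_mem _ hx)) hnd]
      simp [pvAList, h]
    | some v =>
      rw [ih hF.2 (d.insert k v)
        (fun x hx => by
          rw [PySem.Dict.contains_insert]
          have hxk : x ≠ k := fun e => hF.1 (e ▸ hx)
          simp [hxk, hdis x (List.mem_cons_of_mem _ hx)])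
        (PySem.Dict.nodup_keys_insert d k v hnd)]
      rw [PySem.Dict.items_insert_of_not_contains d v (hdis k (List.mem_cons_self))]
      simp [pvAList, h]

lemma catData_items_empty (data : List (String × String)) (F : List String) (hF : F.Nodup) :
    (pvCatData data F).items = pvAList data F := by
  unfold pvCatData
  rw [catData_items data F hF PySem.Dict.empty (fun x _ => PySem.Dict.contains_empty _)
    (by rw [PySem.Dict.keys_empty]; exact List.nodup_nil)]
  rfl

-- A's outer loop is a map over the category list
lemma portA_eq_map (data : List (String × String)) :
    organize_detail_by_categories data
      = DETAIL_CATEGORIES_L.map (fun p => (p.1, (pvCatData data p.2).items)) := by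
  unfold organize_detail_by_categories
  rw [PySem.Dict.items_foldl_insert_fresh DETAIL_CATEGORIES_L Prod.fst
    (fun p => (pvCatData data p.2).items) PySem.Dict.empty
    (fun a _ => PySem.Dict.contains_empty _) (by decide)]
  rfl

-- the per-item routing function of B's single pass
def pvRoute (kv : String × String) : Option (String × (Int × String × String)) :=
  (pvKeyIndex.get? kv.1).map (fun loc => (loc.1, (loc.2, kv.1, kv.2)))

lemma bucket_fold (data : List (String × String))
    (b0 : PySem.Dict String (List (Int × String × String))) :
    data.foldl (fun b kv =>
      match pvKeyIndex.get? kv.1 with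
      | some loc => b.modify loc.1 [] (fun l => l ++ [(loc.2, kv.1, kv.2)])
      | none => b) b0
    = (data.filterMap pvRoute).foldl (fun b x => b.modify x.1 [] (fun l => l ++ [x.2])) b0 := by
  induction data generalizing b0 with
  | nil => rfl
  | cons kv t ih =>
    simp only [List.foldl_cons, List.filterMap_cons, pvRoute]
    cases h : pvKeyIndex.get? kv.1 with
    | none => simp only [Option.map_none]; exact ih b0
    | some loc => simp only [Option.map_some, List.foldl_cons]; exact ih _

lemma pvIdxList_keys_nodup : (pvIdxList.map Prod.fst).Nodup := by decide

lemma pvKeyIndex_items : pvKeyIndex.items = pvIdxList :=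
  items_ofList_nodup _ pvIdxList_keys_nodup

lemma keyIndex_sound {k : String} {loc : String × Int} (h : pvKeyIndex.get? k = some loc) :
    ∃ p ∈ DETAIL_CATEGORIES_L, p.1 = loc.1 ∧ (loc.2, k) ∈ PySem.List.enumerate p.2 := by
  have hm : (k, loc) ∈ pvKeyIndex.items := PySem.Dict.mem_items_of_get?_eq_some _ h
  rw [pvKeyIndex_items, pvIdx_eq] at hm
  simp only [List.mem_flatMap, List.mem_map] at hm
  obtain ⟨p, hp, q, hq, he⟩ := hm
  exact ⟨p, hp, by cases he; rfl, by cases he; simpa using hq⟩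

lemma keyIndex_complete {p : String × List String} (hp : p ∈ DETAIL_CATEGORIES_L)
    {i : Int} {k : String} (h : (i, k) ∈ PySem.List.enumerate p.2) :
    pvKeyIndex.get? k = some (p.1, i) := by
  apply PySem.Dict.get?_of_mem_items
  · rw [pvKeyIndex_items, pvIdx_eq]
    simp only [List.mem_flatMap, List.mem_map]
    exact ⟨p, hp, (i, k), h, rfl⟩
  · have := pvIdxList_keys_nodup
    simpa [PySem.Dict.keys, pvKeyIndex_items] using this

-- categories are uniquely named
lemma cats_nodup : (DETAIL_CATEGORIES_L.map Prod.fst).Nodup := by decide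

-- B's bucket for the category c, expressed as one filterMap over data
def pvSel (c : String) (data : List (String × String)) : List (Int × String × String) :=
  data.filterMap (fun kv =>
    match pvKeyIndex.get? kv.1 with
    | some loc => if loc.1 = c then some (loc.2, kv.1, kv.2) else none
    | none => none)

lemma bucket_eq_sel (c : String) (data : List (String × String)) :
    ((data.filterMap pvRoute).filter (fun x => x.1 == c)).map (fun x => x.2) = pvSel c data := by
  rw [List.filter_filterMap, List.map_filterMap]
  unfold pvSel
  apply List.filterMap_congr
  intro kv _
  unfold pvRoute
  cases h : pvKeyIndex.get? kv.1 with
  | none => simp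
  | some loc =>
    by_cases hc : loc.1 = c <;> simp [Option.filter, hc]

-- the canonical bucket: data restricted to category fields, in field order with positions
def pvTgt (data : List (String × String)) (F : List String) : List (Int × String × String) :=
  (PySem.List.enumerate F).filterMap (fun q => (data.lookup q.2).map (fun v => (q.1, q.2, v)))

lemma tgt_pairwise (data : List (String × String)) (F : List String) :
    (pvTgt data F).Pairwise (fun a b => a.1 < b.1) := by
  unfold pvTgt
  rw [List.pairwise_filterMap]
  refine (PySem.List.pairwise_lt_enumerate F 0).imp ?_
  rintro ⟨i, k⟩ ⟨j, k'⟩ hij x hx y hy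
  cases h1 : data.lookup k <;> rw [h1] at hx <;> try simp at hx
  cases h2 : data.lookup k' <;> rw [h2] at hy <;> try simp at hy
  subst hx; subst hy; simpa using hij

lemma tgt_nodup (data : List (String × String)) (F : List String) : (pvTgt data F).Nodup :=
  (tgt_pairwise data F).imp (fun h => by intro e; subst e; exact lt_irrefl _ h)

lemma sel_nodup (c : String) (data : List (String × String))
    (hnd : (data.map Prod.fst).Nodup) : (pvSel c data).Nodup := by
  unfold pvSel
  apply List.Nodup.filterMap ?_ hnd.of_map
  intro a a' b hb hb'
  cases h : pvKeyIndex.get? a.1 <;> rw [h] at hb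
  · simp at hb
  · cases h' : pvKeyIndex.get? a'.1 <;> rw [h'] at hb'
    · simp at hb'
    · rename_i loc loc'
      by_cases hc : loc.1 = c
      · by_cases hc' : loc'.1 = c
        · simp only [hc, if_true, Option.mem_def, Option.some.injEq] at hb
          simp only [hc', if_true, Option.mem_def, Option.some.injEq] at hb'
          have he : (loc.2, a.1, a.2) = (loc'.2, a'.1, a'.2) := hb.trans hb'.symm
          have e2 : a.1 = a'.1 := congrArg (fun y => y.2.1) he
          have e3 : a.2 = a'.2 := congrArg (fun y => y.2.2) he
          cases a; cases a'; simp_all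
        · simp [hc'] at hb'
      · simp [hc] at hb

lemma mem_sel_iff (data : List (String × String)) (hnd : (data.map Prod.fst).Nodup)
    {p : String × List String} (hp : p ∈ DETAIL_CATEGORIES_L)
    (x : Int × String × String) : x ∈ pvSel p.1 data ↔ x ∈ pvTgt data p.2 := by
  obtain ⟨i, k, v⟩ := x
  unfold pvSel pvTgt
  simp only [List.mem_filterMap]
  constructor
  · rintro ⟨kv, hkv, hx⟩
    cases h : pvKeyIndex.get? kv.1 <;> rw [h] at hx
    · simp at hx
    · rename_i loc
      by_cases hc : loc.1 = p.1
      · simp only [hc, if_true, Option.some.injEq] at hx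
        have h1 : loc.2 = i := congrArg Prod.fst hx
        have h2 : kv.1 = k := congrArg (fun y => y.2.1) hx
        have h3 : kv.2 = v := congrArg (fun y => y.2.2) hx
        obtain ⟨p', hp', hc', he⟩ := keyIndex_sound h
        have hpp : p' = p :=
          List.inj_on_of_nodup_map cats_nodup hp' hp (by rw [hc', hc])
        subst hpp
        refine ⟨(i, kv.1), ?_, ?_⟩
        · rwa [← h1]
        · have hkv2 : kv = (k, v) := by cases kv; simp_all
          rw [hkv2]
          rw [(lookup_eq_some_iff_mem data k v hnd).mpr (hkv2 ▸ hkv)]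
          simp
      · simp [hc] at hx
  · rintro ⟨⟨i', k'⟩, hq, hx⟩
    cases h : data.lookup k' <;> rw [h] at hx
    · simp at hx
    · rename_i v'
      simp only [Option.map_some, Option.some.injEq, Prod.mk.injEq] at hx
      obtain ⟨h1, h2, h3⟩ := hx
      rw [← h1, ← h2, ← h3]
      refine ⟨(k', v'), (lookup_eq_some_iff_mem data k' v' hnd).mp h, ?_⟩
      rw [keyIndex_complete hp hq]
      simp

lemma sorted_sel_eq_tgt (data : List (String × String)) (hnd : (data.map Prod.fst).Nodup)
    {p : String × List String} (hp : p ∈ DETAIL_CATEGORIES_L) :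
    PySem.List.sorted (pvSel p.1 data) (fun t => t.1) = pvTgt data p.2 := by
  apply PySem.List.sorted_eq_of_perm_of_pairwise_lt
  · exact (List.perm_ext_iff_of_nodup (tgt_nodup data p.2) (sel_nodup p.1 data hnd)).mpr
      (fun x => (mem_sel_iff data hnd hp x).symm)
  · exact tgt_pairwise data p.2

lemma tgt_map_proj (data : List (String × String)) (F : List String) :
    (pvTgt data F).map (fun t => (t.2.1, t.2.2)) = pvAList data F := by
  unfold pvTgt pvAList
  rw [List.map_filterMap]
  have : F.filterMap (fun k => (data.lookup k).map (fun v => (k, v)))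
      = ((PySem.List.enumerate F 0).map (fun x => x.2)).filterMap
          (fun k => (data.lookup k).map (fun v => (k, v))) := by
    rw [PySem.List.map_snd_enumerate]
  rw [this, List.filterMap_map]
  apply List.filterMap_congr
  intro q _
  cases h : data.lookup q.2 <;> simp [h, Function.comp]

lemma aList_map_fst (data : List (String × String)) (F : List String) :
    (pvAList data F).map Prod.fst = F.filter (fun k => (data.lookup k).isSome) := by
  unfold pvAList
  induction F with
  | nil => rfl
  | cons k t ih =>
    cases h : data.lookup k <;> simp [h, ih]

lemma fields_nodup : ∀ p ∈ DETAIL_CATEGORIES_L, p.2.Nodup := by decide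

-- B's value of one bucket list equals A's per-category item list
lemma inner_eq (data : List (String × String)) (hnd : (data.map Prod.fst).Nodup)
    {p : String × List String} (hp : p ∈ DETAIL_CATEGORIES_L) :
    (PySem.Dict.ofList ((PySem.List.sorted (pvSel p.1 data) (fun t => t.1)).map
      (fun t => (t.2.1, t.2.2)))).items = pvAList data p.2 := by
  rw [sorted_sel_eq_tgt data hnd hp, tgt_map_proj]
  apply items_ofList_nodup
  rw [aList_map_fst]
  exact (fields_nodup p hp).filter _

lemma buckets0_getD (c : String) :
    (PySem.Dict.ofList (pvCats.map
        (fun c => (c, ([] : List (Int × String × String)))))).getD c [] = [] := by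
  cases h : (PySem.Dict.ofList (pvCats.map
      (fun c => (c, ([] : List (Int × String × String)))))).get? c with
  | none => exact PySem.Dict.getD_of_get?_eq_none _ _ h
  | some v =>
    have hm := PySem.Dict.mem_items_of_get?_eq_some _ h
    rw [items_ofList_nodup _ (by
      rw [pvCats_eq]; simpa [List.map_map, Function.comp] using cats_nodup)] at hm
    obtain ⟨c', _, he⟩ := List.mem_map.mp hm
    rw [PySem.Dict.getD_of_get?_eq_some _ _ h]
    cases he; rfl

-- ===== the verdict =====
theorem organize_detail_by_categories_spec : Claim_equal_organize_detail_by_categories := by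
  intro data _ hpre
  unfold Spec_organize_detail_by_categories
  unfold Pre_organize_detail_by_categories at hpre
  rw [portA_eq_map]
  simp only [organize_detail_by_categories_alt]
  rw [bucket_fold]
  set B := (data.filterMap pvRoute).foldl
    (fun b x => b.modify x.1 [] (fun l => l ++ [x.2]))
    (PySem.Dict.ofList (pvCats.map
      (fun c => (c, ([] : List (Int × String × String)))))) with hB
  have hgetD : ∀ c, B.getD c [] = pvSel c data := by
    intro c
    rw [hB, PySem.Dict.getD_foldl_modify_append, buckets0_getD, bucket_eq_sel]
    rfl
  rw [items_ofList_nodup _ (by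
    rw [List.map_map]
    simpa [Function.comp, pvCats_eq] using cats_nodup)]
  rw [pvCats_eq, List.map_map]
  apply List.map_congr_left
  intro p hp
  simp only [Function.comp]
  rw [hgetD p.1, inner_eq data hpre hp, catData_items_empty data p.2 (fields_nodup p hp)]
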